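-- pv_equiv track=rewrite | github.com/h-badams/cpu | emulator/assembler.py | resolve_labels
-- ===== SOURCE A (Python) =====
-- def resolve_labels(instructions):
--     '''
--     Replaces all instances of labels with their correct address
--     '''
--     pc = 0
--     label_to_addr = {}
--
--     for instr in instructions:
--         if len(instr) == 2 and instr[1] == 'LABEL':
--             label_to_addr[instr[0]] = pc
--         else:
--             pc += 4
--
--     pc = 0
--     resolved = []
--
--     for instr in instructions:
--         if len(instr) == 2 and instr[1] == 'LABEL':
--             continue
--
--         opcode = instr[0]
--         label = instr[-1]
--
--         if opcode in {'beq', 'bne', 'blt', 'bge', 'bltu', 'bgeu', 'jal'}: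
--             if is_number(label):
--                 resolved.append(instr)
--             elif label in label_to_addr:
--                 offset = label_to_addr[label] - pc
--                 label = str(offset)
--                 resolved.append((*instr[:-1], label))
--             else:
--                 raise ValueError(f"label \"{label}\" is unknown")
--         else:
--             resolved.append(instr)
--         pc += 4
--
--     return resolved
--
-- def is_number(s):
--     try:
--         int(s, 0)
--         return True
--     except:
--         return False
-- ===== SOURCE B (Python) =====
-- BRANCH_OPS = frozenset({'beq', 'bne', 'blt', 'bge', 'bltu', 'bgeu', 'jal'})
--
--
-- def is_number(s):
--     try:
--         int(s, 0)
--         return True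
--     except Exception:
--         return False
--
--
-- def _label_addr(instructions, label):
--     """Address of the last definition of `label`, by direct scan; None if undefined."""
--     addr = None
--     a = 0
--     for ins in instructions:
--         if len(ins) == 2 and ins[1] == 'LABEL':
--             if ins[0] == label:
--                 addr = a
--         else:
--             a += 4
--     return addr
--
--
-- def resolve_labels(instructions):
--     '''
--     Replaces all instances of labels with their correct address
--     '''
--     # No label table at all: a single pass over the program; each symbolic branch
--     # target is resolved by scanning the program directly for its label.
--     resolved = []
--     pc = 0
--     for instr in instructions:
--         if len(instr) == 2 and instr[1] == 'LABEL':
--             continue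
--         label = instr[-1]
--         if instr[0] in BRANCH_OPS and not is_number(label):
--             addr = _label_addr(instructions, label)
--             if addr is None:
--                 raise ValueError(f'label "{label}" is unknown')
--             resolved.append((*instr[:-1], str(addr - pc)))
--         else:
--             resolved.append(instr)
--         pc += 4
--     return resolved
-- ===== Notes on version B (the rewrite author's own statement) =====
-- stated objective: alternative
-- what changed: B removes the label dictionary and the address pre-pass entirely: a single pass over the program resolves each symbolic branch target by scanning the instruction list directly for its (last) label definition, so no table is built or maintained.
import Mathlib
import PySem

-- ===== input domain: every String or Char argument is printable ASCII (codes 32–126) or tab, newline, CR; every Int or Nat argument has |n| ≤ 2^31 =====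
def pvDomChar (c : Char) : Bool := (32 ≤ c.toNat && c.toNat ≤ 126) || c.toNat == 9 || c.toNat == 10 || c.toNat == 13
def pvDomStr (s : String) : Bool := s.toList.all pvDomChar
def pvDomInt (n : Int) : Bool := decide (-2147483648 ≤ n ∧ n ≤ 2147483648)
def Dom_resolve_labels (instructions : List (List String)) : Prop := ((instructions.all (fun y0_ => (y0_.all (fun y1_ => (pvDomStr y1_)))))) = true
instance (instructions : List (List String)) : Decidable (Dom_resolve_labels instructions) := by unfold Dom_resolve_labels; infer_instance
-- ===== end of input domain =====

-- B drops the label dictionary and the address pre-pass: one pass over the program,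
-- each symbolic branch target resolved by a direct scan of the instruction list.

-- shared helper: Python's is_number(s) = int(s, 0) succeeds (both Source A and Source B define it identically)
def pvIsNumber (s : String) : Bool := (PySem.Int.ofStrBase? s 0).isSome

-- the branch-opcode set literal of the Python source
def pvBranch : List String := ["beq", "bne", "blt", "bge", "bltu", "bgeu", "jal"]

-- ===== PORT A =====
-- `instr[1]` / `instr[0]` under the `len(instr) == 2` guard are exact via getD; `instr[-1]` is
-- getLastD "" (exact for instr ≠ [], which Pre_ guarantees for real instructions — Python raises
-- IndexError on `instr[0]` for an empty real instruction); `instr[:-1]` = dropLast (exact).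
-- Where Python raises ValueError (unknown label, outside Pre_) the port appends instr unchanged.
def resolve_labels (instructions : List (List String)) : List (List String) :=
  let p1 := instructions.foldl (fun (st : Int × PySem.Dict String Int) instr =>
      if instr.length == 2 && instr.getD 1 "" == "LABEL" then
        (st.1, st.2.insert (instr.getD 0 "") st.1)
      else (st.1 + 4, st.2)) (0, PySem.Dict.empty)
  let label_to_addr := p1.2
  let p2 := instructions.foldl (fun (st : Int × List (List String)) instr =>
      if instr.length == 2 && instr.getD 1 "" == "LABEL" then st
      else
        (st.1 + 4,
          if pvBranch.contains (instr.getD 0 "") then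
            if pvIsNumber (instr.getLastD "") then st.2 ++ [instr]
            else if label_to_addr.contains (instr.getLastD "") then
              st.2 ++ [instr.dropLast ++
                [PySem.Int.toStr (label_to_addr.getD (instr.getLastD "") 0 - st.1)]]
            else st.2 ++ [instr]      -- Python: raise ValueError (excluded by Pre_)
          else st.2 ++ [instr])) (0, ([] : List (List String)))
  p2.2

-- ===== PORT B =====
-- Source B's _label_addr: scan the whole program, remembering the address of the last
-- matching label definition (None if never seen).
def pvLabelAddr (instructions : List (List String)) (label : String) : Option Int :=
  (instructions.foldl (fun (st : Int × Option Int) ins =>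
      if ins.length == 2 && ins.getD 1 "" == "LABEL" then
        (st.1, if ins.getD 0 "" == label then some st.1 else st.2)
      else (st.1 + 4, st.2)) (0, none)).2

-- Source B's single resolution pass; no dictionary, lookup by pvLabelAddr.
def resolve_labels_alt (instructions : List (List String)) : List (List String) :=
  (instructions.foldl (fun (st : Int × List (List String)) instr =>
      if instr.length == 2 && instr.getD 1 "" == "LABEL" then st
      else
        (st.1 + 4,
          if pvBranch.contains (instr.getD 0 "") && !pvIsNumber (instr.getLastD "") then
            match pvLabelAddr instructions (instr.getLastD "") with
            | some a => st.2 ++ [instr.dropLast ++ [PySem.Int.toStr (a - st.1)]]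
            | none => st.2 ++ [instr]      -- Python: raise ValueError (excluded by Pre_)
          else st.2 ++ [instr])) (0, ([] : List (List String)))).2

-- ===== PRECONDITION & SPEC =====
-- Pre_ excludes exactly the inputs on which the Python raises: an empty real (non-label)
-- instruction (IndexError on instr[0]) and a branch instruction whose non-numeric last
-- field names no label (ValueError).
def Pre_resolve_labels (instructions : List (List String)) : Prop :=
  (instructions.all (fun instr =>
    (instr.length == 2 && instr.getD 1 "" == "LABEL") ||
    (!instr.isEmpty &&
      (!(pvBranch.contains (instr.getD 0 "")) || pvIsNumber (instr.getLastD "") ||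
        instructions.any (fun l =>
          l.length == 2 && l.getD 1 "" == "LABEL" && l.getD 0 "" == instr.getLastD ""))))) = true
instance (instructions : List (List String)) : Decidable (Pre_resolve_labels instructions) := by
  unfold Pre_resolve_labels; infer_instance

def pvWitness_resolve_labels : List (List String) :=
  [["loop", "LABEL"], ["beq", "x0", "x1", "loop"], ["add", "x1", "x2", "x3"]]

def Spec_resolve_labels (instructions : List (List String)) (out : List (List String)) : Prop :=
  out = resolve_labels_alt instructions
instance (instructions : List (List String)) (out : List (List String)) :
    Decidable (Spec_resolve_labels instructions out) := by
  unfold Spec_resolve_labels; infer_instance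

-- ===== CLAIM (what is proved, stated in full; the proofs are below) =====
def Claim_equal_resolve_labels : Prop :=
  ∀ (instructions : List (List String)), Dom_resolve_labels instructions →
    Pre_resolve_labels instructions →
    Spec_resolve_labels instructions (resolve_labels instructions)

-- ===== LEMMAS AND PROOFS =====

-- A's dict after the first pass answers get? exactly as B's direct scan:
-- generalized over the start pc and an arbitrary start dict / option.
theorem pv_lookup (lab : String) (l : List (List String)) (pc : Int)
    (d : PySem.Dict String Int) :
    ((l.foldl (fun (st : Int × PySem.Dict String Int) instr =>
        if instr.length == 2 && instr.getD 1 "" == "LABEL" then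
          (st.1, st.2.insert (instr.getD 0 "") st.1)
        else (st.1 + 4, st.2)) (pc, d)).2).get? lab =
      (l.foldl (fun (st : Int × Option Int) ins =>
        if ins.length == 2 && ins.getD 1 "" == "LABEL" then
          (st.1, if ins.getD 0 "" == lab then some st.1 else st.2)
        else (st.1 + 4, st.2)) (pc, d.get? lab)).2 := by
  induction l generalizing pc d with
  | nil => simp
  | cons instr rest ih =>
      simp only [List.foldl]
      cases h : (instr.length == 2 && instr.getD 1 "" == "LABEL") with
      | false => simp only [Bool.false_eq_true, if_false]; exact ih (pc + 4) d
      | true =>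
          simp only [if_true]
          rw [ih pc (d.insert (instr.getD 0 "") pc)]
          by_cases hk : instr.getD 0 "" = lab
          · rw [hk, PySem.Dict.get?_insert_self]; simp
          · have hb : (instr.getD 0 "" == lab) = false := by simpa using hk
            rw [PySem.Dict.get?_insert_of_ne d pc (fun hl => hk hl.symm), hb]
            simp

-- A's per-instruction body equals B's, given the lookup agreement
theorem pv_step (d : PySem.Dict String Int) (instructions : List (List String))
    (instr : List String) (pc : Int) (acc : List (List String))
    (h : d.get? (instr.getLastD "") = pvLabelAddr instructions (instr.getLastD "")) :
    (if pvBranch.contains (instr.getD 0 "") then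
       if pvIsNumber (instr.getLastD "") then acc ++ [instr]
       else if d.contains (instr.getLastD "") then
         acc ++ [instr.dropLast ++ [PySem.Int.toStr (d.getD (instr.getLastD "") 0 - pc)]]
       else acc ++ [instr]
     else acc ++ [instr]) =
    (if pvBranch.contains (instr.getD 0 "") && !pvIsNumber (instr.getLastD "") then
       match pvLabelAddr instructions (instr.getLastD "") with
       | some a => acc ++ [instr.dropLast ++ [PySem.Int.toStr (a - pc)]]
       | none => acc ++ [instr]
     else acc ++ [instr]) := by
  cases hb : pvBranch.contains (instr.getD 0 "") with
  | false => simp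
  | true =>
    cases hn : pvIsNumber (instr.getLastD "") with
    | true => simp
    | false =>
      cases hg : d.get? (instr.getLastD "") with
      | some a =>
          have hc2 : d.contains ((instr.getLast?).getD "") = true := by
            rw [PySem.Dict.contains_eq_isSome_get?, ← List.getLastD_eq_getLast?, hg]; rfl
          have hv2 : d.getD ((instr.getLast?).getD "") 0 = a := by
            rw [PySem.Dict.getD_eq_get?_getD, ← List.getLastD_eq_getLast?, hg]; rfl
          rw [← h, hg]
          simp [hc2, hv2]
      | none =>
          have hc2 : d.contains ((instr.getLast?).getD "") = false := by
            rw [PySem.Dict.contains_eq_isSome_get?, ← List.getLastD_eq_getLast?, hg]; rfl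
          rw [← h, hg]
          simp [hc2]

-- A's second pass over any list l = B's single pass over l, given lookup agreement
theorem pv_pass (d : PySem.Dict String Int) (instructions : List (List String))
    (h : ∀ lab, d.get? lab = pvLabelAddr instructions lab)
    (l : List (List String)) (pc : Int) (acc : List (List String)) :
    (l.foldl (fun (st : Int × List (List String)) instr =>
        if instr.length == 2 && instr.getD 1 "" == "LABEL" then st
        else
          (st.1 + 4,
            if pvBranch.contains (instr.getD 0 "") then
              if pvIsNumber (instr.getLastD "") then st.2 ++ [instr]
              else if d.contains (instr.getLastD "") then
                st.2 ++ [instr.dropLast ++ [PySem.Int.toStr (d.getD (instr.getLastD "") 0 - st.1)]]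
              else st.2 ++ [instr]
            else st.2 ++ [instr])) (pc, acc)) =
      (l.foldl (fun (st : Int × List (List String)) instr =>
        if instr.length == 2 && instr.getD 1 "" == "LABEL" then st
        else
          (st.1 + 4,
            if pvBranch.contains (instr.getD 0 "") && !pvIsNumber (instr.getLastD "") then
              match pvLabelAddr instructions (instr.getLastD "") with
              | some a => st.2 ++ [instr.dropLast ++ [PySem.Int.toStr (a - st.1)]]
              | none => st.2 ++ [instr]
            else st.2 ++ [instr])) (pc, acc)) := by
  induction l generalizing pc acc with
  | nil => rfl
  | cons instr rest ih =>
      simp only [List.foldl]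
      cases hl : (instr.length == 2 && instr.getD 1 "" == "LABEL") with
      | true => simp only [if_true]; exact ih pc acc
      | false =>
          simp only [Bool.false_eq_true, if_false]
          rw [pv_step d instructions instr pc acc (h _)]
          exact ih (pc + 4) _

-- ===== VERDICT (by name: the statement is the Claim_ definition above) =====
theorem resolve_labels_spec : Claim_equal_resolve_labels := by
  intro instructions _ _
  show resolve_labels instructions = resolve_labels_alt instructions
  simp only [resolve_labels, resolve_labels_alt]
  rw [pv_pass _ instructions (fun lab => by
    rw [pv_lookup lab instructions 0 PySem.Dict.empty]
    simp [pvLabelAddr, PySem.Dict.get?_empty])]
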